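-- pv_equiv track=rewrite | github.com/atkinssamuel/SokobanSolver | solution.py | findPermutationSum
-- ===== SOURCE A (Python) =====
-- INF = 100000000000
--
-- def findPermutationSum(matchingMatrix, sum):
--   rowCount = len(matchingMatrix)
--   if rowCount ==  1:
--     sum += min(matchingMatrix[0])
--     return sum
--   minimum = min(matchingMatrix[0])
--   minIndex = matchingMatrix[0].index(minimum)
--   sum += minimum
--   for i in range(1, len(matchingMatrix)):
--     matchingMatrix[i][minIndex] = INF
--   del(matchingMatrix[0])
--   return findPermutationSum(matchingMatrix, sum)
-- ===== SOURCE B (Python) =====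
-- INF = 100000000000
--
-- def findPermutationSum(matchingMatrix, sum):
--     # Non-destructive single forward pass: instead of writing INF into later
--     # rows and deleting the front row, keep the list of already-chosen column
--     # indices and view each row through it.  (A mutates its argument; B does
--     # not -- return values are identical.)
--     used = []
--     for row in matchingMatrix:
--         effective = [INF if j in used else v for j, v in enumerate(row)]
--         minimum = min(effective)
--         sum += minimum
--         used.append(effective.index(minimum))
--     return sum
-- ===== Notes on version B (the rewrite author's own statement) =====
-- stated objective: simpler
-- what changed: Replaces the destructive tail recursion (write INF into every later row, delete the front row, recurse) by one non-mutating forward loop that views each row through the list of already-chosen column indices.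
-- outside the precondition, e.g. on findPermutationSum([[0, 5], [7]], 0): A returns 100000000000, B returns 100000000000
import Mathlib
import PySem

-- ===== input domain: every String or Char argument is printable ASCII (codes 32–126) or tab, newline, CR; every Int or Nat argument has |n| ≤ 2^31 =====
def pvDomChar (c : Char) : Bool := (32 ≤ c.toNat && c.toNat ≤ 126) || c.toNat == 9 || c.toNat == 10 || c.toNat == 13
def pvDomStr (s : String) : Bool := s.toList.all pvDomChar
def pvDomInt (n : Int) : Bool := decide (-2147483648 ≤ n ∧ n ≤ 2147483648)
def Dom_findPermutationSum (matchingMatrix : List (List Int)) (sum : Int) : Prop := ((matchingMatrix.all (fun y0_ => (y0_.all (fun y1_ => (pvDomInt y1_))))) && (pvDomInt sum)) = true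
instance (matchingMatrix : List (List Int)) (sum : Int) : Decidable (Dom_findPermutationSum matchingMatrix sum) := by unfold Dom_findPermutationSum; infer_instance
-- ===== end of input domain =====

-- B replaces A's destructive recursion (mark columns with INF, delete the front row,
-- recurse) by one non-mutating forward loop over the rows carrying the list of chosen
-- column indices; A mutates its argument, B does not — the equivalence is about the
-- return value.

-- ===== PORT A =====
def findPermutationSum (matchingMatrix : List (List Int)) (sum : Int) : Int :=
  match matchingMatrix with
  | [] => sum      -- Python raises IndexError here; excluded by Pre_
  | [row] => sum + (PySem.List.min? row (fun x => x)).getD 0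
  | row :: rest =>
    let minimum := (PySem.List.min? row (fun x => x)).getD 0
    let minIndex := (PySem.List.index? row minimum).getD 0
    findPermutationSum (rest.map (fun r => r.set minIndex 100000000000)) (sum + minimum)
termination_by matchingMatrix.length
decreasing_by simp

-- ===== PORT B =====
-- helper: the comprehension  [INF if j in used else v for j, v in enumerate(row)]
def pvMask (used : List Int) (row : List Int) : List Int :=
  (PySem.List.enumerate row 0).map (fun jv => if jv.1 ∈ used then (100000000000 : Int) else jv.2)

-- helper: one iteration of B's for-loop over (sum, used)
def pvStep (st : Int × List Int) (row : List Int) : Int × List Int :=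
  let effective := pvMask st.2 row
  let minimum := (PySem.List.min? effective (fun x => x)).getD 0
  (st.1 + minimum, st.2 ++ [(((PySem.List.index? effective minimum).getD 0 : Nat) : Int)])

def findPermutationSum_alt (matchingMatrix : List (List Int)) (sum : Int) : Int :=
  (matchingMatrix.foldl pvStep (sum, [])).1

-- ===== PRECONDITION & SPEC =====
-- Pre_ excludes inputs where Python A raises: the empty matrix / an empty row
-- (min/IndexError), and ragged matrices, where writing INF at the chosen column can
-- raise IndexError in a shorter later row; nondecreasing row lengths is the natural
-- closed-form guarantee (slightly narrower than the exact run-time crash-free set).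
def Pre_findPermutationSum (matchingMatrix : List (List Int)) (sum : Int) : Prop :=
  matchingMatrix ≠ [] ∧ (∀ r ∈ matchingMatrix, r ≠ []) ∧
    List.Pairwise (fun a b => a ≤ b) (matchingMatrix.map List.length)
instance (matchingMatrix : List (List Int)) (sum : Int) : Decidable (Pre_findPermutationSum matchingMatrix sum) := by unfold Pre_findPermutationSum; infer_instance

def pvWitness_findPermutationSum : List (List Int) × Int := ([[3, 1], [2, 4]], 0)

def Spec_findPermutationSum (matchingMatrix : List (List Int)) (sum : Int) (out : Int) : Prop := out = findPermutationSum_alt matchingMatrix sum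
instance (matchingMatrix : List (List Int)) (sum : Int) (out : Int) : Decidable (Spec_findPermutationSum matchingMatrix sum out) := by unfold Spec_findPermutationSum; infer_instance

-- ===== CLAIM (what is proved, stated in full; the proofs are below) =====
def Claim_equal_findPermutationSum : Prop := ∀ (matchingMatrix : List (List Int)) (sum : Int), Dom_findPermutationSum matchingMatrix sum → Pre_findPermutationSum matchingMatrix sum → Spec_findPermutationSum matchingMatrix sum (findPermutationSum matchingMatrix sum)

-- ===== LEMMAS AND PROOFS =====

lemma pvMask_nil (row : List Int) : pvMask [] row = row := by
  simp [pvMask, PySem.List.map_snd_enumerate]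

lemma pvMask_length (u row : List Int) : (pvMask u row).length = row.length := by
  simp [pvMask, PySem.List.length_enumerate]

lemma pvMask_getElem (u row : List Int) (i : Nat) (h : i < row.length) :
    (pvMask u row)[i]'(by simpa [pvMask_length]) =
      if (i : Int) ∈ u then (100000000000 : Int) else row[i] := by
  simp [pvMask, List.getElem_map, PySem.List.getElem_enumerate]

lemma pvMask_set (u row : List Int) (k : Nat) (hk : k < row.length) :
    (pvMask u row).set k 100000000000 = pvMask (u ++ [(k : Int)]) row := by
  apply List.ext_getElem
  · simp [pvMask_length]
  · intro i h1 h2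
    have hi : i < row.length := by simpa [pvMask_length] using h2
    rw [List.getElem_set]
    by_cases hik : k = i
    · subst hik
      simp [pvMask_getElem (u ++ [(k : Int)]) row, hi]
    · have : ((i : Int) ∈ u ++ [(k : Int)]) ↔ (i : Int) ∈ u := by
        simp [List.mem_append]
        omega
      simp [hik, pvMask_getElem u row i hi, pvMask_getElem (u ++ [(k : Int)]) row i hi, this]

-- one-step facts about the minimum of a nonempty masked row
lemma pv_min_index (eff : List Int) (hne : eff ≠ []) :
    ∃ m k, PySem.List.min? eff (fun x => x) = some m ∧
      PySem.List.index? eff m = some k ∧ k < eff.length := by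
  cases hmin : PySem.List.min? eff (fun x => x) with
  | none => exact absurd ((PySem.List.min?_eq_none_iff _ _).mp hmin) hne
  | some m =>
    have hmem : m ∈ eff := PySem.List.min?_mem hmin
    rcases Option.isSome_iff_exists.mp (((PySem.List.index?_isSome_iff _ _).mpr hmem)) with ⟨k, hk⟩
    rcases PySem.List.getElem_of_index?_eq_some hk with ⟨hlt, _, _⟩
    exact ⟨m, k, rfl, hk, hlt⟩

-- invariant: A on the matrix with `used` columns already masked equals B's loop
-- continued from state (s, used)
lemma pv_main : ∀ (m : List (List Int)) (used : List Int) (s : Int),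
    (∀ r ∈ m, r ≠ []) → List.Pairwise (fun a b => a ≤ b) (m.map List.length) →
    findPermutationSum (m.map (pvMask used)) s = (m.foldl pvStep (s, used)).1 := by
  intro m
  induction m with
  | nil => intro used s _ _; simp [findPermutationSum]
  | cons r rest ih =>
    intro used s hne hpw
    have hr : r ≠ [] := hne r (by simp)
    have heff : pvMask used r ≠ [] := by
      intro h
      have := pvMask_length used r
      rw [h] at this
      exact hr (List.eq_nil_of_length_eq_zero this.symm)
    rcases pv_min_index (pvMask used r) heff with ⟨mn, k, hmin, hidx, hklt⟩
    have hidx' : List.idxOf? mn (pvMask used r) = some k := by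
      rw [PySem.List.index?_eq_idxOf?] at hidx; exact hidx
    have hklt' : k < r.length := by simpa [pvMask_length] using hklt
    cases rest with
    | nil =>
      simp [findPermutationSum, pvStep, hmin]
    | cons r2 rs =>
      rw [List.map_cons, findPermutationSum]
      case x => simp
      simp only [hmin, hidx, Option.getD_some]
      rw [List.map_cons] at hpw
      have hpw2 := List.pairwise_cons.mp hpw
      have hlen : ∀ rr ∈ (r2 :: rs), r.length ≤ rr.length := by
        intro rr hrr
        exact hpw2.1 rr.length (List.mem_map_of_mem hrr)
      have hset : (r2 :: rs).map ((fun rr => List.set rr k 100000000000) ∘ pvMask used) =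
          (r2 :: rs).map (pvMask (used ++ [(k : Int)])) := by
        apply List.map_congr_left
        intro rr hrr
        simp only [Function.comp_apply]
        exact pvMask_set used rr k (lt_of_lt_of_le hklt' (hlen rr hrr))
      rw [List.map_map, hset]
      have ihres := ih (used ++ [(k : Int)]) (s + mn)
        (fun rr hrr => hne rr (by simp [hrr]))
        (by simpa [List.map_cons] using hpw2.2)
      have hstep : pvStep (s, used) r = (s + mn, used ++ [(k : Int)]) := by
        simp [pvStep, hmin, hidx']
      rw [List.foldl_cons, hstep, ihres]

-- ===== VERDICT (by name: the statement is the Claim_ definition above) =====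
theorem findPermutationSum_spec : Claim_equal_findPermutationSum := by
  intro m s _ hpre
  unfold Spec_findPermutationSum findPermutationSum_alt
  have hmap : m.map (pvMask []) = m := by
    rw [show pvMask [] = id from funext pvMask_nil, List.map_id]
  have := pv_main m [] s hpre.2.1 hpre.2.2
  rw [hmap] at this
  exact this
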